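-- pv_equiv track=rewrite | github.com/lindo-zy/leetcode | 模拟面试/8-16/t1.py | halfQuestions
-- ===== SOURCE A (Python) =====
-- from itertools import groupby
-- from typing import List
--
-- def halfQuestions(questions: List[int]) -> int:
--     # 人数
--     n = len(questions) // 2
--     # 贪心，按多的选，选完再选次多的，满足n即可
--     cnt = 0
--     questions.sort()
--     nums = []
--     for i, item in groupby(questions):
--         nums.append([i, len(list(item))])
--     nums.sort(key=lambda x: x[1], reverse=True)
--     for i in range(len(nums)):
--         n -= nums[i][1]
--         cnt += 1
--         if n <= 0:
--             return cnt
-- ===== SOURCE B (Python) =====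
-- def halfQuestions(questions):
--     # same in-place sort side effect as the original A
--     questions.sort()
--     # per-answer frequencies via a hash map (no groupby)
--     freq = {}
--     for q in questions:
--         freq[q] = freq.get(q, 0) + 1
--     counts = sorted(freq.values(), reverse=True)
--     # prefix sums of the descending counts
--     prefix = []
--     total = 0
--     for c in counts:
--         total += c
--         prefix.append(total)
--     target = len(questions) // 2
--     # binary search: first index whose prefix sum reaches the target
--     lo, hi = 0, len(prefix)
--     while lo < hi:
--         mid = (lo + hi) // 2
--         if prefix[mid] < target:
--             lo = mid + 1
--         else:
--             hi = mid
--     return lo + 1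
-- ===== Notes on version B (the rewrite author's own statement) =====
-- stated objective: alternative
-- what changed: Replaces groupby plus a greedy early-exit loop over the comparison-sorted counts by a hash-map frequency counter, a prefix-sum array over the descending counts, and a hand-written binary search for the first prefix sum reaching half the questions.
-- outside the precondition, e.g. on halfQuestions([]): A returns None, B returns 1
import Mathlib
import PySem

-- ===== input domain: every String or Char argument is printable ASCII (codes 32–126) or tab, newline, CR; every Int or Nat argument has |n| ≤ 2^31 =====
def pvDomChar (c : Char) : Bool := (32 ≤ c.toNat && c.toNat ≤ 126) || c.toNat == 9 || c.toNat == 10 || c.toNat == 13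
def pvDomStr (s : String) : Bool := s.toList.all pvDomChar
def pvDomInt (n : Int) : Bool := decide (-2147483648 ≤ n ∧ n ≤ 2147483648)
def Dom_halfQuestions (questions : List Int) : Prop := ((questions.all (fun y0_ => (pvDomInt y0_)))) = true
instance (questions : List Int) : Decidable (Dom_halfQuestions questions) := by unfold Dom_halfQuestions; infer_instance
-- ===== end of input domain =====

-- B replaces groupby + the greedy early-exit loop over comparison-sorted counts by a hash-map
-- frequency counter, prefix sums of the descending counts and a binary search for the first
-- prefix sum reaching the target (same in-place sort of the argument; equivalence here is
-- about the return value).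


-- ===== PORT A =====
-- port of itertools.groupby over the (sorted) list: consecutive runs as (value, length) pairs
def pvRuns : List Int → List (Int × Int)
  | [] => []
  | x :: xs =>
    (x, (xs.takeWhile (fun y => y == x)).length + 1) :: pvRuns (xs.dropWhile (fun y => y == x))
termination_by l => l.length
decreasing_by
  simp only [List.length_cons]
  exact Nat.lt_succ_of_le (List.length_dropWhile_le _ _)

-- A's final loop: for i in range(len(nums)): n -= nums[i][1]; cnt += 1; if n <= 0: return cnt
def pvLoopA : List (Int × Int) → Int → Int → Int
  | [], _, _ => 0          -- loop falls through: Python returns None (excluded by Pre_)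
  | p :: rest, n, cnt =>
    let n' := n - p.2
    let cnt' := cnt + 1
    if n' ≤ 0 then cnt' else pvLoopA rest n' cnt'

def halfQuestions (questions : List Int) : Int :=
  let n := PySem.Int.floordiv (questions.length : Int) 2
  let qs := PySem.List.sorted questions (fun x => x) false
  let nums := pvRuns qs
  let nums' := PySem.List.sorted nums (fun p => p.2) true
  pvLoopA nums' n 0

-- ===== PORT B =====
-- freq = {}; for q in questions: freq[q] = freq.get(q, 0) + 1
def pvCount (s : List Int) : PySem.Dict Int Int :=
  s.foldl (fun d q => d.insert q (d.getD q 0 + 1)) PySem.Dict.empty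

-- prefix-sum loop body: total += c; prefix.append(total)
def pvPrefixStep (st : List Int × Int) (c : Int) : List Int × Int :=
  (st.1 ++ [st.2 + c], st.2 + c)

-- while lo < hi: mid = (lo+hi)//2; if prefix[mid] < target: lo = mid+1 else hi = mid
-- (prefix[mid] ported as getD _ 0: mid < hi ≤ len(prefix) throughout, so the index is in range)
def pvBSearch (p : List Int) (t : Int) (lo hi : Nat) : Nat :=
  if lo < hi then
    let mid := (lo + hi) / 2
    if p.getD mid 0 < t then pvBSearch p t (mid + 1) hi else pvBSearch p t lo mid
  else lo
termination_by hi - lo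
decreasing_by all_goals omega

def halfQuestions_alt (questions : List Int) : Int :=
  let qs := PySem.List.sorted questions (fun x => x) false
  let freq := pvCount qs
  let counts := PySem.List.sorted freq.values (fun x => x) true
  let pref := (counts.foldl pvPrefixStep ([], 0)).1
  let target := PySem.Int.floordiv (questions.length : Int) 2
  ((pvBSearch pref target 0 pref.length : Nat) : Int) + 1

-- ===== PRECONDITION & SPEC =====
-- Pre_ excludes the empty list, on which Python's A falls through the loop and returns None (not an int).
def Pre_halfQuestions (questions : List Int) : Prop := questions ≠ []
instance (questions : List Int) : Decidable (Pre_halfQuestions questions) := by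
  unfold Pre_halfQuestions; infer_instance
def pvWitness_halfQuestions : List Int := [1, 5, 1, 2]

def Spec_halfQuestions (questions : List Int) (out : Int) : Prop := out = halfQuestions_alt questions
instance (questions : List Int) (out : Int) : Decidable (Spec_halfQuestions questions out) := by
  unfold Spec_halfQuestions; infer_instance

-- ===== CLAIM (what is proved, stated in full; the proofs are below) =====
def Claim_equal_halfQuestions : Prop := ∀ (questions : List Int), Dom_halfQuestions questions → Pre_halfQuestions questions → Spec_halfQuestions questions (halfQuestions questions)

-- ===== LEMMAS AND PROOFS =====

-- the greedy loop over a plain list of counts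
def pvRun : List Int → Int → Int → Int
  | [], _, _ => 0
  | f :: rest, n, cnt =>
    let n' := n - f
    if n' ≤ 0 then cnt + 1 else pvRun rest n' (cnt + 1)

-- number of strict prefixes of l whose sum stays below n
def pvCountLt : List Int → Int → Nat
  | [], _ => 0
  | f :: rest, n => if n - f ≤ 0 then 0 else pvCountLt rest (n - f) + 1

-- running prefix sums starting from t
def pvPrefixList : List Int → Int → List Int
  | [], _ => []
  | c :: rest, t => (t + c) :: pvPrefixList rest (t + c)

theorem loopA_run : ∀ (l : List (Int × Int)) (n cnt : Int),
    pvLoopA l n cnt = pvRun (l.map (·.2)) n cnt := by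
  intro l
  induction l with
  | nil => intro n cnt; rfl
  | cons p rest ih =>
    intro n cnt
    simp only [pvLoopA, pvRun, List.map_cons]
    split <;> simp [ih]

theorem run_countLt : ∀ (l : List Int) (n cnt : Int), l ≠ [] → (∀ x ∈ l, 1 ≤ x) →
    n ≤ l.sum → pvRun l n cnt = cnt + (pvCountLt l n : Int) + 1 := by
  intro l
  induction l with
  | nil => intro n cnt h _ _; exact absurd rfl h
  | cons f rest ih =>
    intro n cnt _ hpos hsum
    simp only [pvRun, pvCountLt]
    by_cases h : n - f ≤ 0
    · simp [h]
    · rw [if_neg h, if_neg h]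
      cases rest with
      | nil =>
        exfalso
        simp only [List.sum_cons, List.sum_nil, add_zero] at hsum
        omega
      | cons g tl =>
        rw [ih (n - f) (cnt + 1) (by simp) (fun x hx => hpos x (List.mem_cons_of_mem _ hx))
          (by simp only [List.sum_cons] at hsum ⊢; omega)]
        push_cast
        ring

theorem mem_prefixList_gt : ∀ (l : List Int) (t x : Int), (∀ y ∈ l, 1 ≤ y) →
    x ∈ pvPrefixList l t → t < x := by
  intro l
  induction l with
  | nil => intro t x _ hx; simp [pvPrefixList] at hx
  | cons c rest ih =>
    intro t x hpos hx
    have hc : 1 ≤ c := hpos c List.mem_cons_self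
    rcases (List.mem_cons).1 hx with h | h
    · omega
    · have := ih (t + c) x (fun y hy => hpos y (List.mem_cons_of_mem _ hy)) h
      omega

theorem countLt_countP : ∀ (l : List Int) (t n : Int), (∀ x ∈ l, 1 ≤ x) →
    pvCountLt l (n - t) = (pvPrefixList l t).countP (fun x => decide (x < n)) := by
  intro l
  induction l with
  | nil => intro t n _; rfl
  | cons c rest ih =>
    intro t n hpos
    have hpr : ∀ x ∈ rest, 1 ≤ x := fun x hx => hpos x (List.mem_cons_of_mem _ hx)
    simp only [pvCountLt, pvPrefixList, List.countP_cons]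
    by_cases h : n - t - c ≤ 0
    · rw [if_pos h]
      have h1 : (decide (t + c < n)) = false := by simp; omega
      have h2 : (pvPrefixList rest (t + c)).countP (fun x => decide (x < n)) = 0 := by
        apply List.countP_eq_zero.2
        intro x hx
        have := mem_prefixList_gt rest (t + c) x hpr hx
        simp; omega
      simp [h1, h2]
    · rw [if_neg h]
      have h1 : (decide (t + c < n)) = true := by simp; omega
      have h2 : n - t - c = n - (t + c) := by ring
      rw [h2, ih (t + c) n hpr, h1]
      simp

theorem prefixList_pairwise : ∀ (l : List Int) (t : Int), (∀ y ∈ l, 1 ≤ y) →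
    (pvPrefixList l t).Pairwise (· ≤ ·) := by
  intro l
  induction l with
  | nil => intro t _; exact List.Pairwise.nil
  | cons c rest ih =>
    intro t hpos
    have hpr : ∀ x ∈ rest, 1 ≤ x := fun x hx => hpos x (List.mem_cons_of_mem _ hx)
    simp only [pvPrefixList]
    refine List.pairwise_cons.2 ⟨?_, ih (t + c) hpr⟩
    intro x hx
    exact le_of_lt (mem_prefixList_gt rest (t + c) x hpr hx)

theorem countP_char : ∀ (p : List Int) (t : Int), p.Pairwise (· ≤ ·) →
    ∀ i (h : i < p.length), (p[i] < t ↔ i < p.countP (fun x => decide (x < t))) := by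
  intro p t
  induction p with
  | nil => intro _ i h; simp at h
  | cons a q ih =>
    intro hp i h
    obtain ⟨ha, hq⟩ := List.pairwise_cons.1 hp
    by_cases hat : a < t
    · have hcp : (a :: q).countP (fun x => decide (x < t)) =
          q.countP (fun x => decide (x < t)) + 1 := by
        rw [List.countP_cons]; simp [hat]
      cases i with
      | zero => simp [hcp, hat]
      | succ i =>
        have hi : i < q.length := by simpa using h
        have := ih hq i hi
        simp only [List.getElem_cons_succ, hcp]
        omega
    · have hcq : q.countP (fun x => decide (x < t)) = 0 := by
        apply List.countP_eq_zero.2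
        intro y hy
        have := ha y hy
        simp; omega
      have hcp : (a :: q).countP (fun x => decide (x < t)) = 0 := by
        rw [List.countP_cons]; simp [hat, hcq]
      cases i with
      | zero => simp [hcp, hat]
      | succ i =>
        have hi : i < q.length := by simpa using h
        have hm : q[i] ∈ q := List.getElem_mem hi
        have := ha _ hm
        simp only [List.getElem_cons_succ, hcp]
        constructor
        · intro hlt; omega
        · intro hlt; omega

theorem bsearch_aux : ∀ (d : Nat) (p : List Int) (t : Int), p.Pairwise (· ≤ ·) →
    ∀ (lo hi : Nat), hi - lo ≤ d → lo ≤ p.countP (fun x => decide (x < t)) →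
      p.countP (fun x => decide (x < t)) ≤ hi → hi ≤ p.length →
      pvBSearch p t lo hi = p.countP (fun x => decide (x < t)) := by
  intro d
  induction d with
  | zero =>
    intro p t _ lo hi hd h1 h2 _
    rw [pvBSearch, if_neg (by omega : ¬ lo < hi)]
    omega
  | succ d ih =>
    intro p t hp lo hi hd h1 h2 h3
    rw [pvBSearch]
    by_cases hlh : lo < hi
    · rw [if_pos hlh]
      show (if p.getD ((lo + hi) / 2) 0 < t then pvBSearch p t ((lo + hi) / 2 + 1) hi
            else pvBSearch p t lo ((lo + hi) / 2)) = List.countP (fun x => decide (x < t)) p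
      have hm1 : lo ≤ (lo + hi) / 2 := by omega
      have hm2 : (lo + hi) / 2 < hi := by omega
      have hmlen : (lo + hi) / 2 < p.length := by omega
      rw [List.getD_eq_getElem p 0 hmlen]
      have hchar := countP_char p t hp ((lo + hi) / 2) hmlen
      by_cases hc : p[(lo + hi) / 2] < t
      · rw [if_pos hc]
        exact ih p t hp ((lo + hi) / 2 + 1) hi (by omega) (by omega) h2 h3
      · rw [if_neg hc]
        have : ¬ ((lo + hi) / 2 < p.countP (fun x => decide (x < t))) := fun hh => hc (hchar.2 hh)
        exact ih p t hp lo ((lo + hi) / 2) (by omega) h1 (by omega) (by omega)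
    · rw [if_neg hlh]
      omega

theorem foldl_prefixStep : ∀ (l acc0 : List Int) (t : Int),
    l.foldl pvPrefixStep (acc0, t) = (acc0 ++ pvPrefixList l t, t + l.sum) := by
  intro l
  induction l with
  | nil => intro acc0 t; simp [pvPrefixList]
  | cons c rest ih =>
    intro acc0 t
    simp only [List.foldl_cons, pvPrefixStep, pvPrefixList, List.sum_cons]
    rw [ih]
    simp only [List.append_assoc, List.singleton_append, Prod.mk.injEq]
    exact ⟨trivial, by ring⟩

-- counter values = counts of the distinct elements in first-occurrence order
theorem count_values (s : List Int) :
    (pvCount s).values = (PySem.Set.ofList s).map (fun k => (s.count k : Int)) := by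
  have h1 : pvCount s = PySem.Dict.counter s := PySem.Dict.foldl_insert_getD_add_one_eq_counter s
  have h2 : (PySem.Dict.counter s).values = (PySem.Dict.counter s).items.map Prod.snd := rfl
  rw [h1, h2, PySem.Dict.items_counter, List.map_map]
  rfl

theorem foldl_add_mem : ∀ (l s0 : List Int), (∀ y ∈ l, y ∈ s0) →
    l.foldl PySem.Set.add s0 = s0 := by
  intro l
  induction l with
  | nil => intro s0 _; rfl
  | cons y rest ih =>
    intro s0 h
    have hy : PySem.Set.add s0 y = s0 := by
      simp [PySem.Set.add, PySem.Set.contains, h y List.mem_cons_self]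
    simp only [List.foldl_cons, hy]
    exact ih s0 (fun z hz => h z (List.mem_cons_of_mem _ hz))

theorem foldl_add_cons_not_mem : ∀ (l s0 : List Int) (x : Int), x ∉ l →
    l.foldl PySem.Set.add (x :: s0) = x :: l.foldl PySem.Set.add s0 := by
  intro l
  induction l with
  | nil => intro s0 x _; rfl
  | cons y rest ih =>
    intro s0 x hx
    have hyx : y ≠ x := by
      intro h; exact hx (by simp [h])
    have hstep : PySem.Set.add (x :: s0) y = x :: PySem.Set.add s0 y := by
      by_cases hmem : y ∈ s0 <;>
        simp [PySem.Set.add, PySem.Set.contains, List.mem_cons, hyx, hmem]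
    rw [List.foldl_cons, hstep,
      ih (PySem.Set.add s0 y) x (fun h => hx (List.mem_cons_of_mem _ h)), List.foldl_cons]

-- on a sorted list the distinct-element counts are exactly the groupby run lengths
theorem setCount_runs : ∀ (s : List Int), s.Pairwise (· ≤ ·) →
    (PySem.Set.ofList s).map (fun k => (s.count k : Int)) = (pvRuns s).map (·.2) := by
  intro s
  induction s using pvRuns.induct with
  | case1 => intro _; simp [pvRuns]
  | case2 x xs ih =>
    intro hp
    have hxs : xs.takeWhile (fun y => y == x) ++ xs.dropWhile (fun y => y == x) = xs :=
      List.takeWhile_append_dropWhile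
    have hall1 : ∀ y ∈ xs.takeWhile (fun y => y == x), y = x := fun y hy => by
      simpa using List.mem_takeWhile_imp hy
    have hxle : ∀ y ∈ xs, x ≤ y := fun y hy => List.rel_of_pairwise_cons hp hy
    have hpxs : xs.Pairwise (· ≤ ·) := (List.pairwise_cons.1 hp).2
    have hpt2 : (xs.dropWhile (fun y => y == x)).Pairwise (· ≤ ·) :=
      List.Pairwise.sublist (List.dropWhile_sublist _) hpxs
    have hxnot : x ∉ xs.dropWhile (fun y => y == x) := by
      cases h2 : xs.dropWhile (fun y => y == x) with
      | nil => simp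
      | cons h0 r =>
        have hw : xs.dropWhile (fun y => y == x) ≠ [] := by simp [h2]
        have hh0 := List.head_dropWhile_not (fun y => y == x) (l := xs) (w := hw)
        have hhead : (xs.dropWhile (fun y => y == x)).head hw = h0 := by simp [h2]
        rw [hhead] at hh0
        have hh0x : h0 ≠ x := by simpa using hh0
        have hh0mem : h0 ∈ xs := (List.dropWhile_sublist _).subset (by rw [h2]; exact List.mem_cons_self)
        have hlt : x < h0 := lt_of_le_of_ne (hxle h0 hh0mem) (Ne.symm hh0x)
        intro hmem
        rcases (List.mem_cons).1 hmem with h | h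
        · omega
        · have : h0 ≤ x := List.rel_of_pairwise_cons (h2 ▸ hpt2) h
          omega
    have hxnott1 : ∀ k ∈ xs.dropWhile (fun y => y == x), k ∉ xs.takeWhile (fun y => y == x) := by
      intro k hk hmem
      have : k = x := hall1 k hmem
      exact hxnot (this ▸ hk)
    have hc1 : (xs.takeWhile (fun y => y == x)).count x =
        (xs.takeWhile (fun y => y == x)).length := by
      rw [List.count_eq_length]
      intro y hy
      exact (hall1 y hy).symm
    have hcx : (x :: xs).count x = (xs.takeWhile (fun y => y == x)).length + 1 := by
      rw [← hxs, List.count_cons, List.count_append, hc1,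
        List.count_eq_zero.2 hxnot]
      simp
    have hck : ∀ k ∈ xs.dropWhile (fun y => y == x),
        (x :: xs).count k = (xs.dropWhile (fun y => y == x)).count k := by
      intro k hk
      have hkx : k ≠ x := fun h => hxnot (h ▸ hk)
      rw [← hxs, List.count_cons, List.count_append,
        List.count_eq_zero.2 (hxnott1 k hk)]
      simp [Ne.symm hkx]
    have hset : PySem.Set.ofList (x :: xs) = x :: PySem.Set.ofList (xs.dropWhile (fun y => y == x)) := by
      have hadd : PySem.Set.add [] x = [x] := rfl
      conv_lhs => rw [PySem.Set.ofList_eq_foldl, ← hxs, List.foldl_cons, hadd,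
        List.foldl_append]
      rw [foldl_add_mem _ [x] (fun y hy => by simp [hall1 y hy]),
        foldl_add_cons_not_mem _ [] x hxnot, ← PySem.Set.ofList_eq_foldl]
    rw [hset]
    have hruns : pvRuns (x :: xs) =
        (x, ((xs.takeWhile (fun y => y == x)).length : Int) + 1) ::
          pvRuns (xs.dropWhile (fun y => y == x)) := by
      rw [pvRuns]
    rw [hruns]
    simp only [List.map_cons]
    congr 1
    · rw [hcx]; push_cast; ring
    · rw [← ih hpt2]
      apply List.map_congr_left
      intro k hk
      have hkmem : k ∈ xs.dropWhile (fun y => y == x) := (PySem.Set.mem_ofList _ _).1 hk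
      rw [hck k hkmem]

theorem sum_runs : ∀ (l : List Int), ((pvRuns l).map (·.2)).sum = (l.length : Int) := by
  intro l
  induction l using pvRuns.induct with
  | case1 => simp [pvRuns]
  | case2 x xs ih =>
    simp only [pvRuns, List.map_cons, List.sum_cons, ih]
    have h := congrArg List.length
      (List.takeWhile_append_dropWhile (p := fun y => y == x) (l := xs))
    simp only [List.length_append] at h
    simp only [List.length_cons]
    push_cast
    omega

theorem runs_pos : ∀ (l : List Int), ∀ c ∈ (pvRuns l).map (·.2), 1 ≤ c := by
  intro l
  induction l using pvRuns.induct with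
  | case1 => intro c hc; simp [pvRuns] at hc
  | case2 x xs ih =>
    intro c hc
    simp only [pvRuns, List.map_cons, List.mem_cons] at hc
    rcases hc with hc | hc
    · subst hc; omega
    · exact ih c hc

-- ===== VERDICT (by name: the statement is the Claim_ definition above) =====
theorem halfQuestions_spec : Claim_equal_halfQuestions := by
  intro questions _ hpre
  unfold Spec_halfQuestions
  show pvLoopA
      (PySem.List.sorted (pvRuns (PySem.List.sorted questions (fun x => x) false)) (fun p => p.2) true)
      (PySem.Int.floordiv ((questions.length : Int)) 2) 0 =
    ((pvBSearch
        ((PySem.List.sorted (pvCount (PySem.List.sorted questions (fun x => x) false)).values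
          (fun x => x) true).foldl pvPrefixStep ([], 0)).1
        (PySem.Int.floordiv ((questions.length : Int)) 2) 0
        ((PySem.List.sorted (pvCount (PySem.List.sorted questions (fun x => x) false)).values
          (fun x => x) true).foldl pvPrefixStep ([], 0)).1.length : Nat) : Int) + 1
  set s := PySem.List.sorted questions (fun x => x) false with hs
  have hlen : s.length = questions.length := PySem.List.length_sorted _ _ _
  have hsp : s.Pairwise (· ≤ ·) := by
    simpa using PySem.List.sorted_pairwise questions (fun x => x)
  have hsne : s ≠ [] := by
    intro h
    exact hpre ((PySem.List.sorted_eq_nil_iff _ _ _).1 h)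
  set n := PySem.Int.floordiv ((questions.length : Int)) 2 with hn
  set C := PySem.List.sorted ((pvCount s).values) (fun x => x) true with hC
  have hvals : (pvCount s).values = (pvRuns s).map (·.2) := by
    rw [count_values, setCount_runs s hsp]
  have hpermC : C.Perm ((pvRuns s).map (·.2)) := by
    rw [hC, hvals]
    exact PySem.List.sorted_perm _ _ _
  have hpermA : ((PySem.List.sorted (pvRuns s) (fun p => p.2) true).map (·.2)).Perm
      ((pvRuns s).map (·.2)) := (PySem.List.sorted_perm _ _ _).map _
  have hAC : (PySem.List.sorted (pvRuns s) (fun p => p.2) true).map (·.2) = C := by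
    refine (hpermA.trans hpermC.symm).eq_of_pairwise
      (fun a b _ _ h1 h2 => le_antisymm h2 h1) ?_ ?_
    · exact (PySem.List.sorted_pairwise_rev (pvRuns s) (fun p => p.2)).map _ (fun _ _ hh => hh)
    · exact PySem.List.sorted_pairwise_rev ((pvCount s).values) (fun x => x)
  have hCpos : ∀ c ∈ C, 1 ≤ c := by
    intro c hc
    exact runs_pos s c (hpermC.subset hc)
  have hCsum : C.sum = (s.length : Int) := by
    rw [hpermC.sum_eq, sum_runs]
  have hCne : C ≠ [] := by
    intro h
    have : pvRuns s = [] := by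
      have := hpermC
      rw [h] at this
      cases hr : pvRuns s with
      | nil => rfl
      | cons a b => rw [hr] at this; exact absurd this.symm (by simp)
    cases hsx : s with
    | nil => exact hsne hsx
    | cons a b => rw [hsx, pvRuns] at this; simp at this
  have hn0 : 0 ≤ n ∧ n ≤ (questions.length : Int) := by
    rw [hn, PySem.Int.floordiv_eq_ediv_of_pos (by norm_num)]
    refine ⟨?_, ?_⟩ <;> omega
  rw [loopA_run, hAC]
  rw [run_countLt C n 0 hCne hCpos (by rw [hCsum, hlen]; exact hn0.2)]
  rw [foldl_prefixStep]
  simp only [List.nil_append]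
  rw [bsearch_aux (pvPrefixList C 0).length (pvPrefixList C 0) n
    (prefixList_pairwise C 0 hCpos) 0 (pvPrefixList C 0).length (by omega)
    (by omega) List.countP_le_length (le_refl _)]
  have := countLt_countP C 0 n hCpos
  simp only [sub_zero] at this
  rw [← this]
  ring
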